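-- pv_equiv track=rewrite | github.com/ShubhamSingh3/ScikitDemo | scikit-demo.py | t2v
-- ===== SOURCE A (Python) =====
-- def t2v(tokens,attributes):
--     vect=[]
--     for feature in attributes:
--         if feature in tokens:
--             vect.append(1)         #Presence
--         else:
--             vect.append(0)         #Absence
--     return vect
-- ===== SOURCE B (Python) =====
-- def t2v(tokens, attributes):
--     # Build an index: attribute -> list of its positions (duplicates preserved),
--     # then a single pass over tokens marks the positions present.
--     index = {}
--     for i, a in enumerate(attributes):
--         index[a] = index.get(a, []) + [i]
--     vect = [0] * len(attributes)
--     for tok in tokens: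
--         for i in index.get(tok, []):
--             vect[i] = 1
--     return vect
-- ===== Notes on version B (the rewrite author's own statement) =====
-- stated objective: faster
-- what changed: Replaces the per-attribute membership scan over tokens with an attribute->positions dict built once, a zero vector, and a single pass over tokens that sets the indexed positions to 1.
import Mathlib
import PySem

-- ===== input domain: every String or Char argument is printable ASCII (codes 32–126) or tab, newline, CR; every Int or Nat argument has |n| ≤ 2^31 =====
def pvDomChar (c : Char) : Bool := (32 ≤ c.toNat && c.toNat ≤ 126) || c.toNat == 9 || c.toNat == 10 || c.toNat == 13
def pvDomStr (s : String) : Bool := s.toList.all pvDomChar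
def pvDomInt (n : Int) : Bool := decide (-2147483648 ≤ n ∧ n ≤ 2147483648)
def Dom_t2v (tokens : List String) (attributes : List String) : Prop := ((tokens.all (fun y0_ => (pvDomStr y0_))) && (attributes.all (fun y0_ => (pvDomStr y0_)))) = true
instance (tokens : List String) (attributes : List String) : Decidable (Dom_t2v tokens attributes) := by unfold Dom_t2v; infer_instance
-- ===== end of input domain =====

-- B replaces A's nested membership scans with an attribute→positions index plus one pass over tokens (alternative decomposition, same results).

-- ===== PORT A =====
-- for feature in attributes: vect.append(1 if feature in tokens else 0)
def t2v (tokens : List String) (attributes : List String) : List Int :=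
  attributes.foldl (fun vect feature =>
    if tokens.contains feature then vect ++ [(1 : Int)] else vect ++ [(0 : Int)]) []

-- ===== PORT B =====
-- index = {}; for i, a in enumerate(attributes): index[a] = index.get(a, []) + [i]
def t2vIndex (attributes : List String) : PySem.Dict String (List Int) :=
  (PySem.List.enumerate attributes 0).foldl
    (fun d p => d.modify p.2 [] (fun l => l ++ [p.1])) PySem.Dict.empty

-- vect = [0]*len(attributes); for tok in tokens: for i in index.get(tok, []): vect[i] = 1
-- (the loop indices i come from enumerate, hence 0 ≤ i < len(vect), so List.set at i.toNat is exact)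
def t2v_alt (tokens : List String) (attributes : List String) : List Int :=
  let index := t2vIndex attributes
  tokens.foldl
    (fun vect tok => (index.getD tok []).foldl (fun v i => v.set i.toNat 1) vect)
    (List.replicate attributes.length (0 : Int))

-- ===== PRECONDITION & SPEC =====
def Spec_t2v (tokens : List String) (attributes : List String) (out : List Int) : Prop := out = t2v_alt tokens attributes
instance (tokens : List String) (attributes : List String) (out : List Int) : Decidable (Spec_t2v tokens attributes out) := by unfold Spec_t2v; infer_instance

-- ===== CLAIM (what is proved, stated in full; the proofs are below) =====
def Claim_equal_t2v : Prop := ∀ (tokens : List String) (attributes : List String), Dom_t2v tokens attributes → Spec_t2v tokens attributes (t2v tokens attributes)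

-- ===== LEMMAS AND PROOFS =====

-- A is the pointwise membership map.
theorem t2v_foldl_acc (tokens : List String) (attributes : List String) (acc : List Int) :
    attributes.foldl (fun vect feature =>
      if tokens.contains feature then vect ++ [(1 : Int)] else vect ++ [(0 : Int)]) acc
    = acc ++ attributes.map (fun a => if a ∈ tokens then (1 : Int) else 0) := by
  induction attributes generalizing acc with
  | nil => simp
  | cons a as ih =>
    rw [List.foldl_cons, ih]
    by_cases h : a ∈ tokens <;> simp [h]

theorem t2v_eq_map (tokens : List String) (attributes : List String) :
    t2v tokens attributes
    = attributes.map (fun a => if a ∈ tokens then (1 : Int) else 0) := by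
  unfold t2v
  simpa using t2v_foldl_acc tokens attributes []

-- The index maps each attribute to exactly its positions in `attributes`.
theorem t2vIndex_getD (attributes : List String) (a : String) :
    (t2vIndex attributes).getD a []
    = ((PySem.List.enumerate attributes 0).filter (fun p => p.2 == a)).map (·.1) := by
  unfold t2vIndex
  have h := PySem.Dict.getD_foldl_modify_append
      (l := (PySem.List.enumerate attributes 0).map Prod.swap)
      (d := PySem.Dict.empty) (c := a)
  simp only [List.foldl_map] at h
  simp only [Prod.swap] at h
  rw [h]
  simp [List.filter_map, Function.comp_def, List.map_map]

theorem mem_t2vIndex_getD (attributes : List String) (a : String) (i : Int) :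
    i ∈ (t2vIndex attributes).getD a []
    ↔ ∃ (k : Nat) (h : k < attributes.length), attributes[k] = a ∧ i = (k : Int) := by
  rw [t2vIndex_getD]
  simp only [List.mem_map, List.mem_filter, PySem.List.mem_enumerate_iff]
  constructor
  · rintro ⟨p, ⟨⟨k, hk, rfl⟩, hfa⟩, rfl⟩
    exact ⟨k, hk, by simpa using hfa, by simp⟩
  · rintro ⟨k, hk, ha, rfl⟩
    exact ⟨((k : Int), attributes[k]), ⟨⟨k, hk, by simp⟩, by simpa using ha⟩, rfl⟩

-- One pass of "for i in l: vect[i] = 1", pointwise.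
theorem setOnes_getElem? (l : List Int) (v : List Int) (j : Nat) :
    (l.foldl (fun v i => v.set i.toNat 1) v)[j]?
    = if ∃ i ∈ l, i.toNat = j then v[j]?.map (fun _ => (1 : Int)) else v[j]? := by
  induction l generalizing v with
  | nil => simp
  | cons i l ih =>
    have hset : (v.set i.toNat 1)[j]? = if i.toNat = j then v[j]?.map (fun _ => (1:Int)) else v[j]? := by
      rw [List.getElem?_set]
      by_cases h : i.toNat = j
      · subst h
        by_cases hl : i.toNat < v.length
        · simp [hl, List.getElem?_eq_getElem hl]
        · simp [hl, List.getElem?_eq_none_iff.mpr (Nat.le_of_not_lt hl)]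
      · simp [h]
    simp only [List.foldl_cons]
    rw [ih, hset]
    by_cases hij : i.toNat = j <;> by_cases hmem : ∃ i' ∈ l, i'.toNat = j <;>
      simp [hij, hmem] <;> (try (cases v[j]? <;> simp))

-- The whole token loop, pointwise.
theorem tokenLoop_getElem? (f : String → List Int) (ts : List String) (v : List Int) (j : Nat) :
    (ts.foldl (fun v tok => (f tok).foldl (fun v i => v.set i.toNat 1) v) v)[j]?
    = if ∃ tok ∈ ts, ∃ i ∈ f tok, i.toNat = j then v[j]?.map (fun _ => (1 : Int)) else v[j]? := by
  induction ts generalizing v with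
  | nil => simp
  | cons t ts ih =>
    simp only [List.foldl_cons]
    rw [ih, setOnes_getElem?]
    by_cases ht : ∃ i ∈ f t, i.toNat = j <;> by_cases hts : ∃ tok ∈ ts, ∃ i ∈ f tok, i.toNat = j <;>
      simp [ht, hts] <;> (try (cases v[j]? <;> simp))

-- ===== VERDICT (by name: the statement is the Claim_ definition above) =====
theorem t2v_spec : Claim_equal_t2v := by
  intro tokens attributes _
  unfold Spec_t2v
  rw [t2v_eq_map]
  unfold t2v_alt
  apply List.ext_getElem?
  intro j
  rw [tokenLoop_getElem?]
  have hcond : (∃ tok ∈ tokens, ∃ i ∈ (t2vIndex attributes).getD tok [], i.toNat = j)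
      ↔ (∃ (h : j < attributes.length), attributes[j] ∈ tokens) := by
    constructor
    · rintro ⟨tok, htok, i, hi, hij⟩
      rcases (mem_t2vIndex_getD attributes tok i).mp hi with ⟨k, hk, ha, rfl⟩
      have : k = j := by simpa using hij
      subst this
      exact ⟨hk, by simpa [ha] using htok⟩
    · rintro ⟨hj, htok⟩
      exact ⟨attributes[j], htok, (j : Int),
        (mem_t2vIndex_getD attributes attributes[j] (j : Int)).mpr ⟨j, hj, rfl, rfl⟩, by simp⟩
  by_cases hj : j < attributes.length
  · have hr : (List.replicate attributes.length (0 : Int))[j]? = some 0 := by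
      simp [hj]
    by_cases hm : attributes[j] ∈ tokens
    · have h1 : ∃ tok ∈ tokens, ∃ i ∈ (t2vIndex attributes).getD tok [], i.toNat = j :=
        hcond.mpr ⟨hj, hm⟩
      simp [h1, hr, List.getElem?_eq_getElem hj, hm]
    · have h1 : ¬ ∃ tok ∈ tokens, ∃ i ∈ (t2vIndex attributes).getD tok [], i.toNat = j := by
        intro h; rcases hcond.mp h with ⟨_, h'⟩; exact hm h'
      simp [h1, hr, List.getElem?_eq_getElem hj, hm]
  · have h1 : ¬ ∃ tok ∈ tokens, ∃ i ∈ (t2vIndex attributes).getD tok [], i.toNat = j := by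
      intro h; rcases hcond.mp h with ⟨h', _⟩; exact hj h'
    have hr : (List.replicate attributes.length (0 : Int))[j]? = none := by
      simp; omega
    simp [h1, hr, List.getElem?_eq_none_iff.mpr (by omega : attributes.length ≤ j)]
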